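-- pv_equiv track=rewrite | github.com/Darwinky25/DARWIN-with-ALLA-engine | visual_scene_parser.py | _is_T_shape
-- ===== SOURCE A (Python) =====
-- from typing import Dict, List, Tuple, Any, Optional
-- from collections import defaultdict
--
-- def _is_T_shape(positions: List[Tuple[int, int]], bbox: Dict[str, int]) -> bool:
--     """Check if positions form a T shape"""
--     if len(positions) < 5:
--         return False
--
--     # T-shape has one horizontal line and one vertical line intersecting
--     rows = [p[0] for p in positions]
--     cols = [p[1] for p in positions]
--
--     row_counts = defaultdict(int)
--     col_counts = defaultdict(int)
--
--     for pos in positions: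
--         row_counts[pos[0]] += 1
--         col_counts[pos[1]] += 1
--
--     # Look for intersection pattern
--     max_row_count = max(row_counts.values()) if row_counts else 0
--     max_col_count = max(col_counts.values()) if col_counts else 0
--
--     # T-shape typically has one dominant row and one dominant column
--     return max_row_count >= 3 and max_col_count >= 3
-- ===== SOURCE B (Python) =====
-- def _has_run_of_3(xs):
--     # xs is sorted, so a value occurring >= 3 times occupies 3 consecutive slots
--     for i in range(len(xs) - 2):
--         if xs[i] == xs[i + 2]:
--             return True
--     return False
--
-- def _is_T_shape(positions, bbox):
--     """Check if positions form a T shape"""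
--     if len(positions) < 5:
--         return False
--     rows = sorted(p[0] for p in positions)
--     cols = sorted(p[1] for p in positions)
--     return _has_run_of_3(rows) and _has_run_of_3(cols)
-- ===== Notes on version B (the rewrite author's own statement) =====
-- stated objective: alternative
-- what changed: Replaced the defaultdict frequency-counting plus max-of-values with sort-then-scan: sort the row and column coordinates and look for a value three slots apart, i.e. a run of length 3 in the sorted list.
import Mathlib
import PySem

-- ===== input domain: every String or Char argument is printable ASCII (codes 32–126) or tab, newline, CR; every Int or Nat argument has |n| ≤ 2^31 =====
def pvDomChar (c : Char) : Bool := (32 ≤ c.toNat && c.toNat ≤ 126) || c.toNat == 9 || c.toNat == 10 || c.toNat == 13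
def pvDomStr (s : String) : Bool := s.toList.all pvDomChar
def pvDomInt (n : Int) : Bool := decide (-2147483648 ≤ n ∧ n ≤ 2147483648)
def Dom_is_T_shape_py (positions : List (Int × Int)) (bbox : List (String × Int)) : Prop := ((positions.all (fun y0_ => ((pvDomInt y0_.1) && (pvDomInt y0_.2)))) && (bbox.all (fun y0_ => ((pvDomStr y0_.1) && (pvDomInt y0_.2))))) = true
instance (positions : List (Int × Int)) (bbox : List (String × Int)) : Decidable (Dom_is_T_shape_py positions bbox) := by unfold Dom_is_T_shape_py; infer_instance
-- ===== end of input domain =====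

-- B replaces A's dict-based frequency counting + max with sorting the coordinates and
-- scanning for a run of three equal values (alternative algorithm, similar cost).


-- ===== PORT A =====
def is_T_shape_py (positions : List (Int × Int)) (bbox : List (String × Int)) : Bool :=
  if positions.length < 5 then false
  else
    let _rows := positions.map (fun p => p.1)
    let _cols := positions.map (fun p => p.2)
    let row_counts : PySem.Dict Int Int :=
      positions.foldl (fun d pos => d.modify pos.1 0 (· + 1)) PySem.Dict.empty
    let col_counts : PySem.Dict Int Int :=
      positions.foldl (fun d pos => d.modify pos.2 0 (· + 1)) PySem.Dict.empty
    -- `max(d.values()) if d else 0`: d is nonempty here, so max? = some; getD 0 is exact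
    let max_row_count : Int :=
      if row_counts.size ≠ 0 then (PySem.List.max? row_counts.values (fun x => x)).getD 0 else 0
    let max_col_count : Int :=
      if col_counts.size ≠ 0 then (PySem.List.max? col_counts.values (fun x => x)).getD 0 else 0
    decide (3 ≤ max_row_count) && decide (3 ≤ max_col_count)

-- ===== PORT B =====
-- indices produced by range(len(xs)-2) are in bounds, so getD equals Python xs[i] exactly
def hasRunOf3 (xs : List Int) : Bool :=
  (List.range (xs.length - 2)).any (fun i => xs.getD i 0 == xs.getD (i + 2) 0)

def is_T_shape_py_alt (positions : List (Int × Int)) (bbox : List (String × Int)) : Bool :=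
  if positions.length < 5 then false
  else
    let rows := PySem.List.sorted (positions.map (fun p => p.1)) (fun x => x) false
    let cols := PySem.List.sorted (positions.map (fun p => p.2)) (fun x => x) false
    hasRunOf3 rows && hasRunOf3 cols

-- ===== PRECONDITION & SPEC =====
def Spec_is_T_shape_py (positions : List (Int × Int)) (bbox : List (String × Int)) (out : Bool) : Prop := out = is_T_shape_py_alt positions bbox
instance (positions : List (Int × Int)) (bbox : List (String × Int)) (out : Bool) : Decidable (Spec_is_T_shape_py positions bbox out) := by unfold Spec_is_T_shape_py; infer_instance

-- ===== CLAIM (what is proved, stated in full; the proofs are below) =====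
def Claim_equal_is_T_shape_py : Prop := ∀ (positions : List (Int × Int)) (bbox : List (String × Int)), Dom_is_T_shape_py positions bbox → Spec_is_T_shape_py positions bbox (is_T_shape_py positions bbox)

-- ===== LEMMAS AND PROOFS =====

-- A side: the max of the counter's values is ≥ 3 iff some value occurs ≥ 3 times
lemma max_counter_ge3 (xs : List Int) (hne : xs ≠ []) :
    (3 ≤ (PySem.List.max? (PySem.Dict.counter xs).values (fun x => x)).getD 0) ↔
      ∃ v ∈ xs, 3 ≤ (xs.count v : Int) := by
  have hnd := PySem.Dict.nodup_keys_counter xs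
  have hv : (PySem.Dict.counter xs).values
      = (PySem.Set.ofList xs).map (fun k => ((xs.count k : Int))) := by
    rw [PySem.Dict.values_eq_map_keys _ hnd 0, PySem.Dict.keys_counter]
    exact List.map_congr_left (fun k _ => PySem.Dict.getD_counter xs k)
  obtain ⟨a, t, rfl⟩ := List.exists_cons_of_ne_nil hne
  have hvn : (PySem.Dict.counter (a :: t)).values ≠ [] := by
    rw [hv]
    have : a ∈ PySem.Set.ofList (a :: t) := by rw [PySem.Set.mem_ofList]; simp
    exact List.ne_nil_of_mem (List.mem_map_of_mem this)
  obtain ⟨m, hm⟩ : ∃ m, PySem.List.max? (PySem.Dict.counter (a :: t)).values (fun x => x) = some m := by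
    cases h : PySem.List.max? (PySem.Dict.counter (a :: t)).values (fun x => x) with
    | none => exact absurd ((PySem.List.max?_eq_none_iff _ _).mp h) hvn
    | some m => exact ⟨m, rfl⟩
  rw [hm]
  simp only [Option.getD_some]
  constructor
  · intro h3
    have hmem := PySem.List.max?_mem hm
    rw [hv, List.mem_map] at hmem
    obtain ⟨k, hk, hkm⟩ := hmem
    exact ⟨k, (PySem.Set.mem_ofList _ _).mp hk, hkm ▸ h3⟩
  · rintro ⟨v, hvx, h3⟩
    have hmem : ((a :: t).count v : Int) ∈ (PySem.Dict.counter (a :: t)).values := by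
      rw [hv]
      exact List.mem_map_of_mem ((PySem.Set.mem_ofList _ _).mpr hvx)
    have := PySem.List.max?_isMax hm _ hmem
    exact le_trans h3 this

-- the counter of a nonempty list is nonempty
lemma counter_size_ne (xs : List Int) (hne : xs ≠ []) :
    (PySem.Dict.counter xs).size ≠ 0 := by
  obtain ⟨a, t, rfl⟩ := List.exists_cons_of_ne_nil hne
  have ha : a ∈ (PySem.Dict.counter (a :: t)).keys := by
    rw [PySem.Dict.keys_counter, PySem.Set.mem_ofList]; simp
  have hk : (PySem.Dict.counter (a :: t)).keys ≠ [] := List.ne_nil_of_mem ha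
  simp only [PySem.Dict.size, PySem.Dict.keys] at *
  intro h
  rw [List.length_eq_zero_iff] at h
  simp [h] at hk

-- B side, easy direction helper: in a sorted list, a value with count ≥ 3 sits in 3 consecutive slots
lemma head_eq_of_count_pos (v : Int) (t : List Int) (hp : t.Pairwise (· ≤ ·))
    (hge : ∀ x ∈ t, v ≤ x) (hc : 0 < t.count v) : ∃ t', t = v :: t' := by
  cases t with
  | nil => simp at hc
  | cons b t' =>
    by_cases hb : b = v
    · exact ⟨t', by rw [hb]⟩
    · exfalso
      have hvmem : v ∈ b :: t' := List.count_pos_iff.mp hc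
      have hvt' : v ∈ t' := by
        rcases List.mem_cons.mp hvmem with h | h
        · exact absurd h.symm hb
        · exact h
      have h1 : b ≤ v := List.rel_of_pairwise_cons hp hvt'
      have h2 : v ≤ b := hge b (List.mem_cons_self)
      exact hb (le_antisymm h1 h2)

lemma run_of_count (ys : List Int) :  ys.Pairwise (· ≤ ·) → ∀ (v : Int),
    3 ≤ ys.count v →
    ∃ i, i + 2 < ys.length ∧ ys.getD i 0 = ys.getD (i + 2) 0 := by
  induction ys with
  | nil => intro _ v hc; simp at hc
  | cons a t ih =>
    intro hp v hc
    have hpt : t.Pairwise (· ≤ ·) := List.Pairwise.of_cons hp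
    by_cases h3 : 3 ≤ t.count v
    · obtain ⟨i, hi, he⟩ := ih hpt v h3
      refine ⟨i + 1, by simpa using by omega, ?_⟩
      simpa [List.getD_cons_succ] using he
    · have hav : a = v := by
        by_contra hne
        rw [List.count_cons] at hc
        simp [hne] at hc
        omega
      have h2 : 2 ≤ t.count v := by
        rw [List.count_cons] at hc
        simp [hav] at hc
        omega
      have hge : ∀ x ∈ t, v ≤ x := fun x hx => hav ▸ List.rel_of_pairwise_cons hp hx
      obtain ⟨t1, rfl⟩ := head_eq_of_count_pos v t hpt hge (by omega)
      have hpt1 : t1.Pairwise (· ≤ ·) := List.Pairwise.of_cons hpt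
      have hge1 : ∀ x ∈ t1, v ≤ x := fun x hx => List.rel_of_pairwise_cons hpt hx
      have hc1 : 0 < t1.count v := by
        simp only [List.count_cons_self] at h2
        omega
      obtain ⟨t2, rfl⟩ := head_eq_of_count_pos v t1 hpt1 hge1 hc1
      exact ⟨0, by simp, by simp [hav]⟩

lemma count_of_run (ys : List Int) (hp : ys.Pairwise (· ≤ ·)) (i : Nat)
    (hi : i + 2 < ys.length) (he : ys.getD i 0 = ys.getD (i + 2) 0) :
    ∃ v ∈ ys, 3 ≤ ys.count v := by
  have hi0 : i < ys.length := by omega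
  have hi1 : i + 1 < ys.length := by omega
  rw [List.getD_eq_getElem ys 0 hi0, List.getD_eq_getElem ys 0 hi] at he
  have hmono := List.pairwise_iff_getElem.mp hp
  have h01 : ys[i] ≤ ys[i+1] := hmono i (i+1) hi0 hi1 (by omega)
  have h12 : ys[i+1] ≤ ys[i+2] := hmono (i+1) (i+2) hi1 hi (by omega)
  have he1 : ys[i+1] = ys[i] := le_antisymm (he ▸ h12) h01
  have hdrop : ys.drop i = ys[i] :: ys[i+1] :: ys[i+2] :: ys.drop (i+3) := by
    rw [List.drop_eq_getElem_cons hi0, List.drop_eq_getElem_cons hi1,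
        List.drop_eq_getElem_cons hi]
  have hcd : 3 ≤ (ys.drop i).count ys[i] := by
    rw [hdrop]
    simp [he1, ← he]
  have hsub : (ys.drop i).Sublist ys := List.drop_sublist i ys
  exact ⟨ys[i], List.getElem_mem hi0, le_trans hcd (hsub.count_le _)⟩

lemma hasRunOf3_sorted (xs : List Int) :
    hasRunOf3 (PySem.List.sorted xs (fun x => x) false) = true ↔
      ∃ v ∈ xs, 3 ≤ (xs.count v : Int) := by
  have hperm := PySem.List.sorted_perm xs (fun x => x) false
  have hpw : (PySem.List.sorted xs (fun x => x) false).Pairwise (· ≤ ·) := by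
    simpa using PySem.List.sorted_pairwise xs (fun x => x)
  unfold hasRunOf3
  rw [List.any_eq_true]
  constructor
  · rintro ⟨i, hir, hbeq⟩
    rw [List.mem_range] at hir
    have hlt : i + 2 < (PySem.List.sorted xs (fun x => x) false).length := by omega
    have he := beq_iff_eq.mp hbeq
    obtain ⟨v, hv, hc⟩ := count_of_run _ hpw i hlt he
    refine ⟨v, (PySem.List.mem_sorted _ _ _ _).mp hv, ?_⟩
    have := hperm.count_eq v
    exact_mod_cast this ▸ hc
  · rintro ⟨v, hv, hc⟩
    have hc' : 3 ≤ (PySem.List.sorted xs (fun x => x) false).count v := by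
      rw [hperm.count_eq v]
      exact_mod_cast hc
    obtain ⟨i, hi, he⟩ := run_of_count _ hpw v hc'
    exact ⟨i, List.mem_range.mpr (by omega), beq_iff_eq.mpr he⟩

-- ===== VERDICT (by name: the statement is the Claim_ definition above) =====
theorem is_T_shape_py_spec : Claim_equal_is_T_shape_py := by
  intro positions bbox _
  unfold Spec_is_T_shape_py is_T_shape_py is_T_shape_py_alt
  by_cases h5 : positions.length < 5
  · simp [h5]
  · simp only [h5, if_false]
    have hbridge : ∀ (xs : List Int), xs ≠ [] →
        ∀ d : PySem.Dict Int Int, d = PySem.Dict.counter xs →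
        (decide (3 ≤ (if d.size ≠ 0 then (PySem.List.max? d.values (fun x => x)).getD 0 else 0)))
          = hasRunOf3 (PySem.List.sorted xs (fun x => x) false) := by
      intro xs hne d hd
      subst hd
      rw [if_pos (counter_size_ne xs hne)]
      rw [Bool.eq_iff_iff]
      simp only [decide_eq_true_eq]
      rw [max_counter_ge3 xs hne, hasRunOf3_sorted]
    have hne : positions ≠ [] := by
      intro h; rw [h] at h5; simp at h5
    have hrne : positions.map (fun p => p.1) ≠ [] := by simpa using hne
    have hcne : positions.map (fun p => p.2) ≠ [] := by simpa using hne
    have hrc : positions.foldl (fun d pos => d.modify pos.1 0 (· + 1)) PySem.Dict.empty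
        = PySem.Dict.counter (positions.map (fun p => p.1)) := by
      rw [PySem.Dict.counter_eq_foldl, List.foldl_map]
    have hcc : positions.foldl (fun d pos => d.modify pos.2 0 (· + 1)) PySem.Dict.empty
        = PySem.Dict.counter (positions.map (fun p => p.2)) := by
      rw [PySem.Dict.counter_eq_foldl, List.foldl_map]
    rw [hbridge _ hrne _ hrc, hbridge _ hcne _ hcc]
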